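-- pv_equiv track=rewrite | github.com/frojasg1/pattern_to_string_list_for_algebraic_notation_chess_moves | src/paint_all_combinations.py | split_into_sub_patterns
-- ===== SOURCE A (Python) =====
-- def get_matching_closing_brace_pos(pattern_str: str, my_pos: int, braces_to_close: int) -> int:
--     if braces_to_close <= 0:
--         raise RuntimeError(f'braces_to_close should be greater than or equal to zero, but was: {braces_to_close}')
--
--     result = None
--     for ind, my_char in enumerate(pattern_str[my_pos:]):
--         if my_char == "{":
--             braces_to_close += 1
--         elif my_char == "}":
--             braces_to_close -= 1
--
--         if braces_to_close == 0:
--             result = my_pos + ind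
--             break
--
--     return result
--
-- def get_next_sub_pattern_start(pattern_str: str, my_pos: int) -> int:
--     result: int = my_pos
--
--     next_block_pos = pattern_str.find("{", my_pos)
--     if next_block_pos != -1 and (next_block_pos < my_pos + 1 or pattern_str[next_block_pos - 1] != "$"):
--         raise RuntimeError('Opening brace "{" was not the start of a block. "$" expected before.' + f'at pattern "{pattern_str}", at pos: {next_block_pos}')
--     next_block_pos -= 1   # at the dollar part
--
--     pattern_str_len = len(pattern_str)
--     if next_block_pos == my_pos: # just starting a block
--         matching_closing_brace_pos = get_matching_closing_brace_pos(pattern_str, my_pos + 2, 1)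
--
--         if matching_closing_brace_pos is None:
--             raise RuntimeError(f'Closing block brace not found at pattern_str: "{pattern_str}", starting at pos: {my_pos}')
--
--         result = matching_closing_brace_pos
--
--         if result + 1 < pattern_str_len and pattern_str[result + 1] == "?":
--             result += 1
--
--         result += 1 # pointing to the next element
--     else:
--         if next_block_pos < 0:
--             result = pattern_str_len
--         else:
--             result = next_block_pos
--
--     return result
--
-- def split_into_sub_patterns(pattern_str: str) -> list:
--     result: list = []
--
--     my_pos: int = 0
--     while my_pos < len(pattern_str):
--         next_sub_pattern_start: int = get_next_sub_pattern_start(pattern_str, my_pos)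
--
--         sub_pattern_str: str = pattern_str[my_pos:next_sub_pattern_start]
--         result.append(sub_pattern_str)
--
--         my_pos = next_sub_pattern_start
--
--     return result
-- ===== SOURCE B (Python) =====
-- def split_into_sub_patterns(pattern_str: str) -> list:
--     # Stage 1: cut the string at every "${" occurrence; stage 2: re-merge pieces
--     # whose braces do not balance (nested "${" inside a block), emitting tokens.
--     pieces = pattern_str.split("${")
--     tokens = []
--     lead = pieces[0]
--     if '{' in lead:
--         raise RuntimeError(f'bare "{{" outside a block in pattern "{pattern_str}"')
--     if lead:
--         tokens.append(lead)
--     i = 1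
--     while i < len(pieces):
--         block_parts = ["${"]
--         depth = 1
--         while True:
--             piece = pieces[i]
--             j = 0
--             while j < len(piece) and depth > 0:
--                 if piece[j] == '{':
--                     depth += 1
--                 elif piece[j] == '}':
--                     depth -= 1
--                 j += 1
--             block_parts.append(piece[:j])
--             if depth == 0:
--                 break
--             i += 1
--             if i == len(pieces):
--                 raise RuntimeError(f'unclosed block in pattern "{pattern_str}"')
--             block_parts.append("${")
--             depth += 1
--         rest = piece[j:]
--         if rest.startswith('?'):
--             block_parts.append('?')
--             rest = rest[1:]
--         tokens.append(''.join(block_parts))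
--         if '{' in rest:
--             raise RuntimeError(f'bare "{{" outside a block in pattern "{pattern_str}"')
--         if rest:
--             tokens.append(rest)
--         i += 1
--     return tokens
-- ===== Notes on version B (the rewrite author's own statement) =====
-- stated objective: alternative
-- what changed: A is a cursor loop that repeatedly calls str.find('{') and jumps the cursor by position arithmetic over the one string; B first cuts the string into pieces with str.split('${') and then iterates over the PIECES, re-merging consecutive pieces while a brace-balance count stays positive to rebuild nested blocks, so no find/position arithmetic on the original string remains.
-- outside the precondition, e.g. on split_into_sub_patterns('{'): A raises RuntimeError, B raises RuntimeError; on split_into_sub_patterns('${'): A raises RuntimeError, B raises RuntimeError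
import Mathlib
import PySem

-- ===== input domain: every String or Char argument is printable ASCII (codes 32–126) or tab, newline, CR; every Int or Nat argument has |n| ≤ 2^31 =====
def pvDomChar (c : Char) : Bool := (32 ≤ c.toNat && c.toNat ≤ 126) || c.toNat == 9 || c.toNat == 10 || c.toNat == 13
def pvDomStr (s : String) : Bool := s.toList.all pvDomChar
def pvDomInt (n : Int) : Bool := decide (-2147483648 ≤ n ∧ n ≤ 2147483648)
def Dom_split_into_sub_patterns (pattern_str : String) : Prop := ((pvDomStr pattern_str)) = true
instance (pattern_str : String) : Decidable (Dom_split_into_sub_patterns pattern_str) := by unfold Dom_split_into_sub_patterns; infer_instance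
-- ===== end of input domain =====

-- B replaces A's find-and-jump cursor over the one string by a two-stage pieces pipeline:
-- cut at every "${" with str.split, then merge pieces by brace balance; same tokens on every
-- well-formed pattern.

-- ===== PORT A =====
-- A works on the string through absolute positions; the port mirrors that on pattern_str.toList.
-- Python raise  ⇒  Option none in the helpers; the top-level loop stops and returns what it has
-- (those inputs are excluded by Pre_ below).

-- for ind, my_char in enumerate(pattern_str[my_pos:]): ...
def pvGmcbpLoop : List Char → Int → Int → Int → Option Int
  | [], _, _, _ => none
  | c :: rest, ind, braces, base =>
    let b := if c = '{' then braces + 1 else if c = '}' then braces - 1 else braces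
    if b = 0 then some (base + ind) else pvGmcbpLoop rest (ind + 1) b base

def get_matching_closing_brace_pos (cs : List Char) (my_pos braces_to_close : Int) : Option Int :=
  if braces_to_close ≤ 0 then none  -- python: raise (callers always pass 1, never reached)
  else pvGmcbpLoop (PySem.List.slice cs (some my_pos) none) 0 braces_to_close my_pos

def get_next_sub_pattern_start (cs : List Char) (my_pos : Int) : Option Int :=
  let next_block_pos := PySem.Chars.findFrom cs ['{'] my_pos none
  if next_block_pos ≠ -1 ∧ (next_block_pos < my_pos + 1 ∨ PySem.List.pyGet? cs (next_block_pos - 1) ≠ some '$')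
  then none  -- python: raise RuntimeError('Opening brace ... "$" expected before ...')
  else
    let nbp := next_block_pos - 1
    let len : Int := cs.length
    if nbp = my_pos then
      match get_matching_closing_brace_pos cs (my_pos + 2) 1 with
      | none => none  -- python: raise RuntimeError('Closing block brace not found ...')
      | some m =>
        let r := if m + 1 < len ∧ PySem.List.pyGet? cs (m + 1) = some '?' then m + 1 else m
        some (r + 1)
    else if nbp < 0 then some len else some nbp

-- while my_pos < len(pattern_str): ... (fuel only makes the loop total; length+1 always suffices)
def pvSplitLoopA (fuel : Nat) (cs : List Char) (my_pos : Int) (acc : List (List Char)) : List (List Char) :=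
  match fuel with
  | 0 => acc
  | fuel + 1 =>
    if my_pos < (cs.length : Int) then
      match get_next_sub_pattern_start cs my_pos with
      | none => acc  -- python: the raise propagates
      | some nxt => pvSplitLoopA fuel cs nxt (acc ++ [PySem.List.slice cs (some my_pos) (some nxt)])
    else acc

def split_into_sub_patterns (pattern_str : String) : List String :=
  (pvSplitLoopA (pattern_str.toList.length + 1) pattern_str.toList 0 []).map String.ofList

-- ===== PORT B =====
-- B's pipeline: pieces = pattern_str.split("${") — ported by hand as this structural
-- recursion, exact for this separator (greedy leftmost non-overlapping scan; the two
-- separator characters are distinct, so matching "${" at the head IS CPython's scan step) —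
-- then one loop over the PIECES, re-merging while the brace balance stays positive.
def pvSplitDL : List Char → List (List Char)
  | [] => [[]]
  | '$' :: '{' :: t => [] :: pvSplitDL t
  | c :: t =>
    match pvSplitDL t with
    | [] => [[c]]          -- unreachable: pvSplitDL never returns []
    | h :: tl => (c :: h) :: tl

-- inner 'while j < len(piece) and depth > 0': (piece[:j], piece[j:], final depth)
def pvScanPiece : List Char → Nat → List Char × List Char × Nat
  | [], d => ([], [], d)
  | c :: t, d =>
    if d = 0 then ([], c :: t, 0)
    else
      let r := pvScanPiece t (if c = '{' then d + 1 else if c = '}' then d - 1 else d)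
      (c :: r.1, r.2.1, r.2.2)

-- the 'while True' merge loop: consume pieces until the brace balance returns to 0;
-- some (block chars after "${", remainder of the closing piece, unconsumed pieces);
-- none = python raise (unclosed block: i == len(pieces))
def pvMergeBlock : List (List Char) → Nat → Option (List Char × List Char × List (List Char))
  | [], _ => none
  | piece :: ps, d =>
    let r := pvScanPiece piece d
    if r.2.2 = 0 then some (r.1, r.2.1, ps)
    else (pvMergeBlock ps (r.2.2 + 1)).map (fun q => (r.1 ++ '$' :: '{' :: q.1, q.2.1, q.2.2))

-- outer 'while i < len(pieces)' over the pieces after the first; fuel only totalizes the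
-- loop (every round consumes at least one piece, so fuel = number of pieces suffices)
def pvLoopB : Nat → List (List Char) → Option (List (List Char))
  | _, [] => some []
  | 0, _ :: _ => none
  | fuel + 1, piece :: ps =>
    match pvMergeBlock (piece :: ps) 1 with
    | none => none                                   -- python: raise (unclosed block)
    | some (body, rest0, ps') =>
      let body2 := if PySem.Chars.startswith rest0 ['?'] then body ++ ['?'] else body
      let rest := if PySem.Chars.startswith rest0 ['?'] then rest0.drop 1 else rest0
      if '{' ∈ rest then none                        -- python: raise (bare '{')
      else
        match pvLoopB fuel ps' with
        | none => none
        | some ts => some (('$' :: '{' :: body2) :: (if rest ≠ [] then [rest] else []) ++ ts)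

def split_into_sub_patterns_alt (pattern_str : String) : List String :=
  match pvSplitDL pattern_str.toList with
  | [] => []                                          -- unreachable: split never returns []
  | lead :: ps =>
    if '{' ∈ lead then []                             -- python: raise (bare '{')
    else
      match pvLoopB ps.length ps with
      | none => []                                    -- python: raise
      | some ts => ((if lead ≠ [] then [lead] else []) ++ ts).map String.ofList

-- ===== PRECONDITION & SPEC =====
-- Pre_ is grammar membership: the pattern must be a sequence of (plain char | "${" braces-balanced
-- "}" ["?"]) — i.e. every top-level '{' is preceded by '$' and every block's braces close before the
-- string ends.  pvWf is the one-pass depth-counter check of that shape (it builds no tokens and is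
-- not either port's tokenizer).  This is exactly the set of inputs on which the Python A returns
-- (elsewhere it raises RuntimeError: '{' not preceded by '$', or an unclosed block).
def pvWf : List Char → Nat → Bool
  | [], d => d == 0
  | c :: rest, d + 1 =>
    if c = '{' then pvWf rest (d + 2) else if c = '}' then pvWf rest d else pvWf rest (d + 1)
  | '$' :: '{' :: rest, 0 => pvWf rest 1
  | '{' :: _, 0 => false
  | _ :: rest, 0 => pvWf rest 0

def Pre_split_into_sub_patterns (pattern_str : String) : Prop := pvWf pattern_str.toList 0 = true
instance (pattern_str : String) : Decidable (Pre_split_into_sub_patterns pattern_str) := by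
  unfold Pre_split_into_sub_patterns; infer_instance

def pvWitness_split_into_sub_patterns : String := "ab${c{d}e}?$x"

def Spec_split_into_sub_patterns (pattern_str : String) (out : List String) : Prop := out = split_into_sub_patterns_alt pattern_str
instance (pattern_str : String) (out : List String) : Decidable (Spec_split_into_sub_patterns pattern_str out) := by unfold Spec_split_into_sub_patterns; infer_instance

-- ===== CLAIM (what is proved, stated in full; the proofs are below) =====
def Claim_equal_split_into_sub_patterns : Prop := ∀ (pattern_str : String), Dom_split_into_sub_patterns pattern_str → Pre_split_into_sub_patterns pattern_str → Spec_split_into_sub_patterns pattern_str (split_into_sub_patterns pattern_str)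

-- ===== LEMMAS AND PROOFS =====
-- Both ports are proved equal to ONE proof-side reference tokenizer pvSplitB (a structural
-- recursion over the character list), then chained.

def pvIsBlockStart : List Char → Bool
  | '$' :: '{' :: _ => true
  | _ => false

-- reference block scan: consume chars keeping a depth counter until it returns to 0
def pvScanBlock : List Char → Nat → Option (List Char × List Char)
  | [], _ => none
  | c :: rest, d =>
    if c = '{' then (pvScanBlock rest (d + 1)).map (fun p => (c :: p.1, p.2))
    else if c = '}' then
      if d = 1 then some ([c], rest)
      else (pvScanBlock rest (d - 1)).map (fun p => (c :: p.1, p.2))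
    else (pvScanBlock rest d).map (fun p => (c :: p.1, p.2))

-- reference plain-text scan: consume chars until a '{' or a "${" block start (or the end)
def pvTakePlain : List Char → List Char × List Char
  | [] => ([], [])
  | c :: rest =>
    if c = '{' ∨ pvIsBlockStart (c :: rest) then ([], c :: rest)
    else ((pvTakePlain rest).1.cons c, (pvTakePlain rest).2)

theorem pvScanBlock_rest_lt : ∀ (u : List Char) (d : Nat) (body rest : List Char),
    pvScanBlock u d = some (body, rest) → rest.length < u.length := by
  intro u
  induction u with
  | nil => intro d body rest h; simp [pvScanBlock] at h
  | cons c t ih =>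
    intro d body rest h
    simp only [pvScanBlock] at h
    split_ifs at h with h1 h2 h3
    · rcases Option.map_eq_some_iff.mp h with ⟨⟨b', r'⟩, hp, he⟩
      cases he; have := ih _ _ _ hp; simpa using Nat.lt_succ_of_lt this
    · cases h; simp
    · rcases Option.map_eq_some_iff.mp h with ⟨⟨b', r'⟩, hp, he⟩
      cases he; have := ih _ _ _ hp; simpa using Nat.lt_succ_of_lt this
    · rcases Option.map_eq_some_iff.mp h with ⟨⟨b', r'⟩, hp, he⟩
      cases he; have := ih _ _ _ hp; simpa using Nat.lt_succ_of_lt this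

theorem pvTakePlain_rest_le : ∀ (u : List Char), (pvTakePlain u).2.length ≤ u.length := by
  intro u
  induction u with
  | nil => simp [pvTakePlain]
  | cons c t ih =>
    simp only [pvTakePlain]
    split_ifs
    · simp
    · simpa using Nat.le_succ_of_le ih

-- the reference tokenizer both ports are reduced to
def pvSplitB : List Char → List (List Char)
  | [] => []
  | '{' :: _ => []
  | '$' :: '{' :: u =>
    match _h : pvScanBlock u 1 with
    | none => []
    | some (body, '?' :: r2) => ('$' :: '{' :: (body ++ ['?'])) :: pvSplitB r2
    | some (body, rest) => ('$' :: '{' :: body) :: pvSplitB rest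
  | c :: rest => (c :: (pvTakePlain rest).1) :: pvSplitB (pvTakePlain rest).2
  termination_by u => u.length
  decreasing_by
  · have h1 : ('?' :: r2).length < u.length := pvScanBlock_rest_lt u 1 body _ (by assumption)
    simp at h1 ⊢; omega
  · have h1 : rest.length < u.length := pvScanBlock_rest_lt u 1 body rest (by assumption)
    simp; omega
  · have h1 := pvTakePlain_rest_le rest; simp; omega

-- unfolding equations for pvWf at depth 0 (the match has overlapping literal patterns)
theorem pvWf_nil (d : Nat) : pvWf [] d = (d == 0) := rfl
theorem pvWf_open (t : List Char) : pvWf ('{' :: t) 0 = false := rfl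
theorem pvWf_bs (v : List Char) : pvWf ('$' :: '{' :: v) 0 = pvWf v 1 := rfl
theorem pvWf_depth (c : Char) (t : List Char) (d : Nat) :
    pvWf (c :: t) (d + 1) = if c = '{' then pvWf t (d + 2) else if c = '}' then pvWf t d else pvWf t (d + 1) := rfl
theorem pvWf_plain (c : Char) (t : List Char) (h1 : c ≠ '{') (h2 : ¬ (c = '$' ∧ ∃ v, t = '{' :: v)) :
    pvWf (c :: t) 0 = pvWf t 0 := by
  rw [pvWf.eq_def]; split <;> simp_all

theorem pvIsBlockStart_iff (c : Char) (t : List Char) :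
    pvIsBlockStart (c :: t) = true ↔ c = '$' ∧ ∃ v, t = '{' :: v := by
  rw [pvIsBlockStart.eq_def]; split <;> simp_all

-- ===== A-side: A's find-based jump lands exactly one pvSplitB-token further =====
theorem pvScanBlock_split : ∀ (u : List Char) (d : Nat) (body rest : List Char),
    pvScanBlock u d = some (body, rest) → u = body ++ rest ∧ body ≠ [] := by
  intro u
  induction u with
  | nil => intro d b r h; simp [pvScanBlock] at h
  | cons c t ih =>
    intro d b r h
    simp only [pvScanBlock] at h
    split_ifs at h with h1 h2 h3
    · rcases Option.map_eq_some_iff.mp h with ⟨⟨b', r'⟩, hp, he⟩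
      cases he; obtain ⟨e1, e2⟩ := ih _ _ _ hp; simp [e1]
    · cases h; simp
    · rcases Option.map_eq_some_iff.mp h with ⟨⟨b', r'⟩, hp, he⟩
      cases he; obtain ⟨e1, e2⟩ := ih _ _ _ hp; simp [e1]
    · rcases Option.map_eq_some_iff.mp h with ⟨⟨b', r'⟩, hp, he⟩
      cases he; obtain ⟨e1, e2⟩ := ih _ _ _ hp; simp [e1]

theorem pvGmcbp_cons (c : Char) (t : List Char) (ind braces base : Int) :
    pvGmcbpLoop (c :: t) ind braces base =
      (if (if c = '{' then braces + 1 else if c = '}' then braces - 1 else braces) = 0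
       then some (base + ind)
       else pvGmcbpLoop t (ind + 1)
              (if c = '{' then braces + 1 else if c = '}' then braces - 1 else braces) base) := rfl

theorem pvScan_gmcbp : ∀ (u : List Char) (d : Nat) (base ind : Int), 1 ≤ d →
    (∀ body rest, pvScanBlock u d = some (body, rest) →
        pvGmcbpLoop u ind (d : Int) base = some (base + ind + body.length - 1)) ∧
    (pvScanBlock u d = none → pvGmcbpLoop u ind (d : Int) base = none) := by
  intro u
  induction u with
  | nil =>
    intro d base ind hd
    exact ⟨fun b r h => by simp [pvScanBlock] at h, fun _ => rfl⟩
  | cons c t ih =>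
    intro d base ind hd
    constructor
    · intro b r h
      simp only [pvScanBlock] at h
      split_ifs at h with h1 h2 h3
      · rcases Option.map_eq_some_iff.mp h with ⟨⟨b', r'⟩, hp, he⟩
        cases he
        have key := (ih (d + 1) base (ind + 1) (by omega)).1 b' r' hp
        rw [pvGmcbp_cons]
        simp only [if_pos h1]
        rw [if_neg (by omega : ¬ ((d : Int) + 1 = 0))]
        rw [(by omega : ((d : Int) + 1) = ((d + 1 : Nat) : Int)), key]
        congr 1; simp only [List.length_cons]; push_cast; omega
      · cases h
        rw [pvGmcbp_cons]
        simp only [if_neg h1, if_pos h2]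
        rw [if_pos (by omega : ((d : Int) - 1 = 0))]
        congr 1; simp only [List.length_cons, List.length_nil]; push_cast; omega
      · rcases Option.map_eq_some_iff.mp h with ⟨⟨b', r'⟩, hp, he⟩
        cases he
        have key := (ih (d - 1) base (ind + 1) (by omega)).1 b' r' hp
        rw [pvGmcbp_cons]
        simp only [if_neg h1, if_pos h2]
        rw [if_neg (by omega : ¬ ((d : Int) - 1 = 0))]
        rw [(by omega : ((d : Int) - 1) = ((d - 1 : Nat) : Int)), key]
        congr 1; simp only [List.length_cons]; push_cast; omega
      · rcases Option.map_eq_some_iff.mp h with ⟨⟨b', r'⟩, hp, he⟩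
        cases he
        have key := (ih d base (ind + 1) hd).1 b' r' hp
        rw [pvGmcbp_cons]
        simp only [if_neg h1, if_neg h2]
        rw [if_neg (by omega : ¬ ((d : Int) = 0)), key]
        congr 1; simp only [List.length_cons]; push_cast; omega
    · intro h
      by_cases h1 : c = '{'
      · simp only [pvScanBlock, if_pos h1, Option.map_eq_none_iff] at h
        have key := (ih (d + 1) base (ind + 1) (by omega)).2 h
        rw [pvGmcbp_cons]
        simp only [if_pos h1]
        rw [if_neg (by omega : ¬ ((d : Int) + 1 = 0))]
        rw [(by omega : ((d : Int) + 1) = ((d + 1 : Nat) : Int)), key]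
      · by_cases h2 : c = '}'
        · by_cases h3 : d = 1
          · exfalso
            simp only [pvScanBlock, if_neg h1, if_pos h2, if_pos h3] at h
            exact Option.some_ne_none _ h
          · simp only [pvScanBlock, if_neg h1, if_pos h2, if_neg h3, Option.map_eq_none_iff] at h
            have key := (ih (d - 1) base (ind + 1) (by omega)).2 h
            rw [pvGmcbp_cons]
            simp only [if_neg h1, if_pos h2]
            rw [if_neg (by omega : ¬ ((d : Int) - 1 = 0))]
            rw [(by omega : ((d : Int) - 1) = ((d - 1 : Nat) : Int)), key]
        · simp only [pvScanBlock, if_neg h1, if_neg h2, Option.map_eq_none_iff] at h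
          have key := (ih d base (ind + 1) hd).2 h
          rw [pvGmcbp_cons]
          simp only [if_neg h1, if_neg h2]
          rw [if_neg (by omega : ¬ ((d : Int) = 0)), key]

theorem pvWf_block : ∀ (u : List Char) (d : Nat), 1 ≤ d → pvWf u d = true →
    ∃ body rest, pvScanBlock u d = some (body, rest) ∧ pvWf rest 0 = true := by
  intro u
  induction u with
  | nil => intro d hd hw; rw [pvWf_nil] at hw; simp at hw; exact absurd hw (by omega)
  | cons c t ih =>
    intro d hd hw
    obtain ⟨d', rfl⟩ : ∃ d', d = d' + 1 := ⟨d - 1, by omega⟩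
    rw [pvWf_depth] at hw
    by_cases h1 : c = '{'
    · rw [if_pos h1] at hw
      obtain ⟨b, r, hs, hr⟩ := ih (d' + 2) (by omega) hw
      exact ⟨c :: b, r, by simp [pvScanBlock, h1, hs], hr⟩
    · by_cases h2 : c = '}'
      · rw [if_neg h1, if_pos h2] at hw
        by_cases hd1 : d' = 0
        · subst hd1
          exact ⟨[c], t, by simp [pvScanBlock, h2], hw⟩
        · obtain ⟨b, r, hs, hr⟩ := ih d' (by omega) hw
          refine ⟨c :: b, r, ?_, hr⟩
          simp only [pvScanBlock, if_neg h1, if_pos h2, if_neg (by omega : ¬ (d' + 1 = 1))]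
          simp [show d' + 1 - 1 = d' from rfl, hs]
      · rw [if_neg h1, if_neg h2] at hw
        obtain ⟨b, r, hs, hr⟩ := ih (d' + 1) hd hw
        exact ⟨c :: b, r, by simp [pvScanBlock, h1, h2, hs], hr⟩

theorem pvTakePlain_spec : ∀ (u : List Char), pvWf u 0 = true →
    u = (pvTakePlain u).1 ++ (pvTakePlain u).2 ∧ (∀ x ∈ (pvTakePlain u).1, x ≠ '{') ∧
      pvWf (pvTakePlain u).2 0 = true ∧
      ((pvTakePlain u).2 = [] ∨ ∃ v, (pvTakePlain u).2 = '$' :: '{' :: v) := by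
  intro u
  induction u with
  | nil => intro h; simpa [pvTakePlain] using h
  | cons c t ih =>
    intro hw
    by_cases hstop : c = '{' ∨ pvIsBlockStart (c :: t) = true
    · have h2 : pvTakePlain (c :: t) = ([], c :: t) := by
        rw [pvTakePlain]; rw [if_pos hstop]
      rcases hstop with h | h
      · subst h; rw [pvWf_open] at hw; cases hw
      · rw [pvIsBlockStart_iff] at h
        obtain ⟨rfl, v, rfl⟩ := h
        rw [h2]
        exact ⟨rfl, by simp, hw, Or.inr ⟨v, rfl⟩⟩
    · rw [not_or] at hstop
      obtain ⟨h1, h2⟩ := hstop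
      rw [Bool.not_eq_true] at h2
      have hnb : ¬ (c = '$' ∧ ∃ v, t = '{' :: v) := by
        rw [← pvIsBlockStart_iff]; simp [h2]
      have hw' : pvWf t 0 = true := by rw [pvWf_plain c t h1 hnb] at hw; exact hw
      have heq : pvTakePlain (c :: t) = ((pvTakePlain t).1.cons c, (pvTakePlain t).2) := by
        rw [pvTakePlain]; rw [if_neg (by simp [h1, h2])]
      obtain ⟨e1, e2, e3, e4⟩ := ih hw'
      rw [heq]
      refine ⟨?_, ?_, e3, e4⟩
      · simpa using congrArg (fun l => c :: l) e1
      · intro x hx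
        rcases List.mem_cons.mp hx with rfl | hx
        · exact h1
        · exact e2 x hx

theorem pvBraceAt (t : List Char) (n : Nat) (h : t[n]? = some '{') : ['{'] <+: t.drop n := by
  have hn : n < t.length := by
    by_contra hc
    rw [List.getElem?_eq_none (by omega)] at h; cases h
  rw [List.drop_eq_getElem_cons hn]
  have : t[n] = '{' := by
    have := List.getElem?_eq_getElem hn
    rw [this] at h; exact (Option.some_inj.mp h)
  rw [this]
  exact ⟨_, rfl⟩

theorem pvNoBraceBefore (t : List Char) (n : Nat) (h : ∀ x ∈ t.take n, x ≠ '{') :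
    ∀ i < n, ¬ ['{'] <+: t.drop i := by
  intro i hi hpre
  obtain ⟨w, hw⟩ := hpre
  have hgi : t[i]? = some '{' := by
    have h0 : (t.drop i)[0]? = t[i + 0]? := List.getElem?_drop
    rw [← hw] at h0
    simpa using h0.symm
  have hlt : i < t.length := by
    by_contra hc
    rw [List.getElem?_eq_none (by omega)] at hgi; cases hgi
  have hmem : '{' ∈ t.take n := by
    have : (t.take n)[i]? = some '{' := by
      rw [List.getElem?_take_of_lt hi]; exact hgi
    exact List.mem_of_getElem? this
  exact h '{' hmem rfl

theorem pvFind_eq_of (s : List Char) (n : Nat) (h0 : ['{'] <+: s.drop n)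
    (hmin : ∀ i < n, ¬ ['{'] <+: s.drop i) : PySem.Chars.find s ['{'] = (n : Int) := by
  have hinf : PySem.Chars.isIn ['{'] s = true :=
    (PySem.Chars.exists_prefix_drop_iff_isIn _ _).mp ⟨n, h0⟩
  have hpos : 0 ≤ PySem.Chars.find s ['{'] := by
    rw [PySem.Chars.find_nonneg_iff]
    exact (PySem.Chars.isIn_iff_infix _ _).mp hinf
  obtain ⟨hpre, hmin'⟩ := PySem.Chars.find_spec hpos
  have h1 : ¬ ((PySem.Chars.find s ['{']).toNat < n) := fun hc => hmin _ hc hpre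
  have h2 : ¬ (n < (PySem.Chars.find s ['{']).toNat) := fun hc => hmin' n hc h0
  omega

theorem pvFind_eq_neg_one (s : List Char) (h : '{' ∉ s) : PySem.Chars.find s ['{'] = -1 := by
  rw [PySem.Chars.find_eq_neg_one_iff]
  intro hc
  exact h (hc.subset (by simp))

theorem pvTakeApp (l1 l2 : List Char) (i : Nat) :
    (l1 ++ l2).take (l1.length + i) = l1 ++ l2.take i := by
  rw [List.take_append]
  congr 1
  · exact List.take_of_length_le (by omega)
  · congr 1; omega

theorem pvDropApp (l1 l2 : List Char) (i : Nat) :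
    (l1 ++ l2).drop (l1.length + i) = l2.drop i := by
  rw [List.drop_append]
  rw [List.drop_of_length_le (by omega)]
  simp

theorem pvSplitB_plain (c : Char) (u : List Char) (h1 : c ≠ '{')
    (h2 : ¬ (c = '$' ∧ ∃ v, u = '{' :: v)) :
    pvSplitB (c :: u) = (c :: (pvTakePlain u).1) :: pvSplitB (pvTakePlain u).2 := by
  rw [pvSplitB.eq_def]
  split <;> simp_all

theorem pvTakeExact (l1 l2 : List Char) (n : Nat) (h : n = l1.length) :
    (l1 ++ l2).take n = l1 := by
  subst h
  rw [← Nat.add_zero l1.length, pvTakeApp]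
  simp

theorem pvDropExact0 (l1 l2 : List Char) (n : Nat) (h : n = l1.length) :
    (l1 ++ l2).drop n = l2 := by
  subst h
  rw [← Nat.add_zero l1.length, pvDropApp]
  rfl

theorem pvSplitB_blockQ (v body r2 : List Char) (h : pvScanBlock v 1 = some (body, '?' :: r2)) :
    pvSplitB ('$' :: '{' :: v) = ('$' :: '{' :: (body ++ ['?'])) :: pvSplitB r2 := by
  rw [pvSplitB.eq_def]
  split
  · rename_i heq; cases heq
  · rename_i heq; simp at heq
  · rename_i u' heq
    cases heq
    split <;> simp_all
  · rename_i hne heq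
    injection heq with hc hr
    exact absurd hr.symm (hne v hc.symm)

theorem pvSplitB_blockN (v body rest : List Char) (h : pvScanBlock v 1 = some (body, rest))
    (hn : ∀ r2, rest ≠ '?' :: r2) :
    pvSplitB ('$' :: '{' :: v) = ('$' :: '{' :: body) :: pvSplitB rest := by
  rw [pvSplitB.eq_def]
  split
  · rename_i heq; cases heq
  · rename_i heq; simp at heq
  · rename_i u' heq
    cases heq
    split
    · rename_i hs; rw [h] at hs; cases hs
    · rename_i body' r2' hs
      rw [h] at hs
      injection hs with hs
      injection hs with hb hr
      exact absurd hr (hn r2')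
    · rename_i body' rest' hcatch hs
      rw [h] at hs
      injection hs with hs
      injection hs with hb hr
      subst hb; subst hr
      rfl
  · rename_i hne heq
    injection heq with hc hr
    exact absurd hr.symm (hne v hc.symm)

theorem pvStep (cs : List Char) (p : Nat) (hp : p < cs.length) (hw : pvWf (cs.drop p) 0 = true) :
    ∃ k : Nat, 1 ≤ k ∧ p + k ≤ cs.length ∧
      get_next_sub_pattern_start cs (p : Int) = some ((p + k : Nat) : Int) ∧
      PySem.List.slice cs (some (p : Int)) (some ((p + k : Nat) : Int)) = (cs.drop p).take k ∧
      pvSplitB (cs.drop p) = (cs.drop p).take k :: pvSplitB (cs.drop (p + k)) ∧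
      pvWf (cs.drop (p + k)) 0 = true := by
  have hple : p ≤ cs.length := le_of_lt hp
  have hsl : ∀ k : Nat, PySem.List.slice cs (some (p : Int)) (some ((p + k : Nat) : Int)) =
      (cs.drop p).take k := by
    intro k
    rw [PySem.List.slice_natCast]
    congr 1
    omega
  have hdropk : ∀ k : Nat, cs.drop (p + k) = (cs.drop p).drop k := by
    intro k
    rw [List.drop_drop]
  have hgetp : ∀ j : Nat, PySem.List.pyGet? cs ((p : Int) + (j : Int)) = (cs.drop p)[j]? := by
    intro j
    rw [show ((p : Int) + (j : Int)) = ((p + j : Nat) : Int) by push_cast; ring]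
    rw [PySem.List.pyGet?_natCast]
    exact List.getElem?_drop.symm
  have hFF := PySem.Chars.findFrom_natCast cs ['{'] p hple
  obtain ⟨c, u, hdp⟩ : ∃ c u, cs.drop p = c :: u := by
    cases hcs : cs.drop p with
    | nil => rw [List.drop_eq_nil_iff] at hcs; omega
    | cons c u => exact ⟨c, u, rfl⟩
  have hL : cs.length = p + 1 + u.length := by
    have h := List.length_drop (l := cs) (i := p)
    rw [hdp] at h
    simp at h
    omega
  rw [hdp] at hw
  by_cases hc : c = '{'
  · subst hc; rw [pvWf_open] at hw; cases hw
  by_cases hbs : c = '$' ∧ ∃ v, u = '{' :: v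
  · -- ============ BLOCK CASE ============
    obtain ⟨rfl, v, rfl⟩ := hbs
    rw [pvWf_bs] at hw
    obtain ⟨body, rest, hscan, hwrest⟩ := pvWf_block v 1 le_rfl hw
    obtain ⟨hvsplit, hbne⟩ := pvScanBlock_split v 1 body rest hscan
    have hlen : cs.length = p + 2 + body.length + rest.length := by
      rw [hL, hvsplit]; simp; omega
    have hfind : PySem.Chars.find (cs.drop p) ['{'] = ((1 : Nat) : Int) := by
      apply pvFind_eq_of
      · rw [hdp]; exact ⟨v, rfl⟩
      · intro i hi
        have hi0 : i = 0 := by omega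
        subst hi0
        rw [hdp]
        simp [List.cons_prefix_cons]
    have hFF' : PySem.Chars.findFrom cs ['{'] ((p : Nat) : Int) none = (p : Int) + 1 := by
      rw [hFF, hfind]; norm_num
    have hg0 : PySem.List.pyGet? cs ((p : Int) + 1 - 1) = some '$' := by
      rw [show ((p : Int) + 1 - 1) = ((p : Int) + ((0 : Nat) : Int)) by push_cast; ring]
      rw [hgetp 0, hdp]
      rfl
    have hcond : ¬ ((p : Int) + 1 ≠ -1 ∧ ((p : Int) + 1 < (p : Int) + 1 ∨
        PySem.List.pyGet? cs ((p : Int) + 1 - 1) ≠ some '$')) := by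
      rintro ⟨-, h2 | h2⟩
      · omega
      · exact h2 hg0
    have hslice2 : PySem.List.slice cs (some ((p : Int) + 2)) none = v := by
      rw [show ((p : Int) + 2) = ((p + 2 : Nat) : Int) by push_cast; ring]
      rw [PySem.List.slice_from_natCast, hdropk 2, hdp]
      rfl
    have hgm : get_matching_closing_brace_pos cs ((p : Int) + 2) 1 =
        some ((p : Int) + 2 + 0 + body.length - 1) := by
      simp only [get_matching_closing_brace_pos]
      rw [if_neg (by norm_num), hslice2]
      exact (pvScan_gmcbp v 1 ((p : Int) + 2) 0 le_rfl).1 body rest hscan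
    have hassoc : ('$' :: '{' :: v) = ('$' :: '{' :: body) ++ rest := by simp [hvsplit]
    have hgetm : PySem.List.pyGet? cs ((p : Int) + 2 + 0 + body.length - 1 + 1) = rest[0]? := by
      rw [show ((p : Int) + 2 + 0 + (body.length : Int) - 1 + 1) =
            ((p : Int) + ((body.length + 2 : Nat) : Int)) by push_cast; ring]
      rw [hgetp (body.length + 2), hdp, hassoc,
        List.getElem?_append_right (by simp)]
      simp
    rcases rest with - | ⟨r0, r2⟩
    · -- rest = [] : block runs to the end of the string, no '?'
      have hq : ¬ ((p : Int) + 2 + 0 + body.length - 1 + 1 < (cs.length : Int) ∧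
          PySem.List.pyGet? cs ((p : Int) + 2 + 0 + body.length - 1 + 1) = some '?') := by
        rintro ⟨h1, -⟩
        rw [hlen] at h1
        push_cast [List.length_nil] at h1
        omega
      refine ⟨body.length + 2, by omega, by omega, ?_, hsl _, ?_, ?_⟩
      · simp only [get_next_sub_pattern_start]
        rw [hFF']
        rw [if_neg hcond]
        rw [if_pos (show (p : Int) + 1 - 1 = (p : Int) by ring)]
        rw [hgm]
        dsimp only
        rw [if_neg hq]
        congr 1
        push_cast
        ring
      · rw [hdp, pvSplitB_blockN v body [] hscan (fun r2 h => by cases h)]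
        have htok : ('$' :: '{' :: v).take (body.length + 2) = '$' :: '{' :: body := by
          rw [hassoc]
          exact pvTakeExact _ _ _ (by simp)
        have hdr : cs.drop (p + (body.length + 2)) = [] := by
          rw [hdropk, hdp, hassoc]
          exact pvDropExact0 _ _ _ (by simp)
        rw [htok, hdr]
      · have hdr : cs.drop (p + (body.length + 2)) = [] := by
          rw [hdropk, hdp, hassoc]
          exact pvDropExact0 _ _ _ (by simp)
        rw [hdr]
        rfl
    · by_cases hr0 : r0 = '?'
      · -- rest starts with '?': token swallows it
        subst hr0
        have hassoc2 : ('$' :: '{' :: v) = ('$' :: '{' :: (body ++ ['?'])) ++ r2 := by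
          simp [hvsplit]
        have hq : ((p : Int) + 2 + 0 + body.length - 1 + 1 < (cs.length : Int) ∧
            PySem.List.pyGet? cs ((p : Int) + 2 + 0 + body.length - 1 + 1) = some '?') := by
          constructor
          · rw [hlen]; push_cast; simp
          · rw [hgetm]; rfl
        refine ⟨body.length + 3, by omega, by simp at hlen; omega, ?_, hsl _, ?_, ?_⟩
        · simp only [get_next_sub_pattern_start]
          rw [hFF']
          rw [if_neg hcond]
          rw [if_pos (show (p : Int) + 1 - 1 = (p : Int) by ring)]
          rw [hgm]
          dsimp only
          rw [if_pos hq]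
          congr 1
          push_cast
          ring
        · rw [hdp, pvSplitB_blockQ v body r2 hscan]
          have htok : ('$' :: '{' :: v).take (body.length + 3) =
              '$' :: '{' :: (body ++ ['?']) := by
            rw [hassoc2]
            exact pvTakeExact _ _ _ (by simp)
          have hdr : cs.drop (p + (body.length + 3)) = r2 := by
            rw [hdropk, hdp, hassoc2]
            exact pvDropExact0 _ _ _ (by simp)
          rw [htok, hdr]
        · have hdr : cs.drop (p + (body.length + 3)) = r2 := by
            rw [hdropk, hdp, hassoc2]
            exact pvDropExact0 _ _ _ (by simp)
          rw [hdr]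
          rw [pvWf_plain '?' r2 (by decide) (by rintro ⟨h, -⟩; exact absurd h (by decide))] at hwrest
          exact hwrest
      · -- rest starts with some other char: token is just the block
        have hq : ¬ ((p : Int) + 2 + 0 + body.length - 1 + 1 < (cs.length : Int) ∧
            PySem.List.pyGet? cs ((p : Int) + 2 + 0 + body.length - 1 + 1) = some '?') := by
          rintro ⟨-, h2⟩
          rw [hgetm] at h2
          simp at h2
          exact hr0 h2
        refine ⟨body.length + 2, by omega, by simp at hlen; omega, ?_, hsl _, ?_, ?_⟩
        · simp only [get_next_sub_pattern_start]
          rw [hFF']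
          rw [if_neg hcond]
          rw [if_pos (show (p : Int) + 1 - 1 = (p : Int) by ring)]
          rw [hgm]
          dsimp only
          rw [if_neg hq]
          congr 1
          push_cast
          ring
        · rw [hdp, pvSplitB_blockN v body (r0 :: r2) hscan
            (fun r2' h => by injection h with h1 _; exact hr0 h1)]
          have htok : ('$' :: '{' :: v).take (body.length + 2) = '$' :: '{' :: body := by
            rw [hassoc]
            exact pvTakeExact _ _ _ (by simp)
          have hdr : cs.drop (p + (body.length + 2)) = r0 :: r2 := by
            rw [hdropk, hdp, hassoc]
            exact pvDropExact0 _ _ _ (by simp)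
          rw [htok, hdr]
        · have hdr : cs.drop (p + (body.length + 2)) = r0 :: r2 := by
            rw [hdropk, hdp, hassoc]
            exact pvDropExact0 _ _ _ (by simp)
          rw [hdr]
          exact hwrest
  · -- ============ PLAIN-TEXT CASE ============
    have hw' : pvWf u 0 = true := by rw [pvWf_plain c u hc hbs] at hw; exact hw
    obtain ⟨e1, e2, e3, e4⟩ := pvTakePlain_spec u hw'
    rcases e4 with he | ⟨v, hv⟩
    · -- no further block: the rest of the string is one plain token
      have hu : u = (pvTakePlain u).1 := by
        conv_lhs => rw [e1, he]
        simp
      have hnob : '{' ∉ cs.drop p := by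
        rw [hdp]
        intro hm
        rcases List.mem_cons.mp hm with h | h
        · exact hc h.symm
        · rw [hu] at h; exact e2 '{' h rfl
      have hfind : PySem.Chars.find (cs.drop p) ['{'] = -1 := pvFind_eq_neg_one _ hnob
      have hFF' : PySem.Chars.findFrom cs ['{'] ((p : Nat) : Int) none = -1 := by
        rw [hFF, hfind]; simp
      refine ⟨u.length + 1, by omega, by omega, ?_, hsl _, ?_, ?_⟩
      · simp only [get_next_sub_pattern_start]
        rw [hFF']
        rw [if_neg (by simp)]
        rw [if_neg (by omega : ¬ ((-1 : Int) - 1 = (p : Int)))]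
        rw [if_pos (by norm_num : (-1 : Int) - 1 < 0)]
        rw [show ((cs.length : Int)) = (((p + (u.length + 1) : Nat)) : Int) by rw [hL]; push_cast; ring]
      · rw [hdp, pvSplitB_plain c u hc hbs, he, ← hu]
        have htok : (c :: u).take (u.length + 1) = c :: u := List.take_of_length_le (by simp)
        have hdr : cs.drop (p + (u.length + 1)) = [] := by
          rw [hdropk, hdp]
          exact List.drop_of_length_le (by simp)
        rw [htok, hdr]
      · have hdr : cs.drop (p + (u.length + 1)) = [] := by
          rw [hdropk, hdp]
          exact List.drop_of_length_le (by simp)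
        rw [hdr]
        rfl
    · -- the plain token runs up to the next "${" block start
      have hu : u = (pvTakePlain u).1 ++ '$' :: '{' :: v := by conv_lhs => rw [e1, hv]
      have hassoc : c :: u = (c :: (pvTakePlain u).1 ++ ['$']) ++ '{' :: v := by
        conv_lhs => rw [hu]
        simp
      have hassoc2 : c :: u = (c :: (pvTakePlain u).1) ++ '$' :: '{' :: v := by
        conv_lhs => rw [hu]
        simp
      have hfind : PySem.Chars.find (cs.drop p) ['{'] =
          (((pvTakePlain u).1.length + 2 : Nat) : Int) := by
        apply pvFind_eq_of
        · apply pvBraceAt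
          rw [hdp, hassoc, List.getElem?_append_right (by simp)]
          simp
        · apply pvNoBraceBefore
          intro x hx
          rw [hdp, hassoc, pvTakeExact _ _ _ (by simp)] at hx
          simp at hx
          rcases hx with h | h | h
          · subst h; exact hc
          · exact e2 x h
          · subst h; decide
      have hFF' : PySem.Chars.findFrom cs ['{'] ((p : Nat) : Int) none =
          (p : Int) + (((pvTakePlain u).1.length + 2 : Nat) : Int) := by
        rw [hFF, hfind]
        rw [if_neg (by push_cast; omega)]
      have hgd : PySem.List.pyGet? cs ((p : Int) + (((pvTakePlain u).1.length + 2 : Nat) : Int) - 1) =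
          some '$' := by
        rw [show ((p : Int) + (((pvTakePlain u).1.length + 2 : Nat) : Int) - 1) =
              ((p : Int) + (((pvTakePlain u).1.length + 1 : Nat) : Int)) by push_cast; ring]
        rw [hgetp _, hdp, hassoc2, List.getElem?_append_right (by simp)]
        simp
      have hcond : ¬ ((p : Int) + (((pvTakePlain u).1.length + 2 : Nat) : Int) ≠ -1 ∧
          ((p : Int) + (((pvTakePlain u).1.length + 2 : Nat) : Int) < (p : Int) + 1 ∨
           PySem.List.pyGet? cs ((p : Int) + (((pvTakePlain u).1.length + 2 : Nat) : Int) - 1) ≠ some '$')) := by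
        rintro ⟨-, h2 | h2⟩
        · push_cast at h2; omega
        · exact h2 hgd
      refine ⟨(pvTakePlain u).1.length + 1, by omega, ?_, ?_, hsl _, ?_, ?_⟩
      · have : u.length = (pvTakePlain u).1.length + v.length + 2 := by
          conv_lhs => rw [hu]
          simp
          omega
        omega
      · simp only [get_next_sub_pattern_start]
        rw [hFF']
        rw [if_neg hcond]
        rw [if_neg (by push_cast; omega)]
        rw [if_neg (by push_cast; omega)]
        congr 1
        push_cast
        ring
      · rw [hdp, pvSplitB_plain c u hc hbs, hv]
        have htok : (c :: u).take ((pvTakePlain u).1.length + 1) = c :: (pvTakePlain u).1 := by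
          rw [hassoc2]
          exact pvTakeExact _ _ _ (by simp)
        have hdr : cs.drop (p + ((pvTakePlain u).1.length + 1)) = '$' :: '{' :: v := by
          rw [hdropk, hdp, hassoc2]
          exact pvDropExact0 _ _ _ (by simp)
        rw [htok, hdr]
      · have hdr : cs.drop (p + ((pvTakePlain u).1.length + 1)) = '$' :: '{' :: v := by
          rw [hdropk, hdp, hassoc2]
          exact pvDropExact0 _ _ _ (by simp)
        rw [hdr, ← hv]
        exact e3

theorem pvLoopA_eq_splitB (fuel : Nat) : ∀ (cs : List Char) (p : Nat) (acc : List (List Char)),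
    cs.length - p < fuel → p ≤ cs.length → pvWf (cs.drop p) 0 = true →
    pvSplitLoopA fuel cs (p : Int) acc = acc ++ pvSplitB (cs.drop p) := by
  induction fuel with
  | zero => intro cs p acc h; omega
  | succ fuel ih =>
    intro cs p acc hf hp hw
    by_cases hlt : p < cs.length
    · obtain ⟨k, hk1, hk2, hstep, hslice, hB, hw'⟩ := pvStep cs p hlt hw
      rw [pvSplitLoopA]
      rw [if_pos (by exact_mod_cast hlt), hstep]
      have hred : (match some ((p + k : Nat) : Int) with
          | none => acc
          | some nxt => pvSplitLoopA fuel cs nxt (acc ++ [PySem.List.slice cs (some (p : Int)) (some nxt)])) =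
          pvSplitLoopA fuel cs ((p + k : Nat) : Int) (acc ++ [PySem.List.slice cs (some (p : Int)) (some ((p + k : Nat) : Int))]) := rfl
      rw [hred, ih cs (p + k) _ (by omega) hk2 hw', hslice, hB]
      simp
    · have hpe : p = cs.length := by omega
      subst hpe
      rw [pvSplitLoopA, if_neg (by omega)]
      simp [pvSplitB]

-- ===== B-side: the split-at-"${" pieces pipeline also computes pvSplitB =====

-- reassembling the pieces: the string is lead ++ pvGlue laterPieces
def pvGlue : List (List Char) → List Char
  | [] => []
  | p :: ps => '$' :: '{' :: (p ++ pvGlue ps)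

theorem pvSplitDL_nil : pvSplitDL [] = [[]] := rfl
theorem pvSplitDL_sep (t : List Char) : pvSplitDL ('$' :: '{' :: t) = [] :: pvSplitDL t := rfl
theorem pvSplitDL_cons (c : Char) (t : List Char) (h : ¬ (c = '$' ∧ ∃ v, t = '{' :: v)) :
    pvSplitDL (c :: t) =
      (match pvSplitDL t with
       | [] => [[c]]
       | h :: tl => (c :: h) :: tl) := by
  rw [pvSplitDL.eq_def]; split <;> simp_all

theorem pvSplitDL_ne_nil : ∀ (cs : List Char), pvSplitDL cs ≠ [] := by
  intro cs
  induction cs using pvSplitDL.induct with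
  | case1 => simp [pvSplitDL_nil]
  | case2 t ih => simp [pvSplitDL_sep]
  | case3 c t hns hnil ih =>
    rw [pvSplitDL_cons c t (by rintro ⟨rfl, v, rfl⟩; exact hns v rfl rfl), hnil]
    simp
  | case4 c t hns h0 tl0 hdl ih =>
    rw [pvSplitDL_cons c t (by rintro ⟨rfl, v, rfl⟩; exact hns v rfl rfl), hdl]
    simp

theorem pvSplitDL_head_prefix : ∀ (cs : List Char) (h : List Char) (tl : List (List Char)),
    pvSplitDL cs = h :: tl → h <+: cs := by
  intro cs
  induction cs using pvSplitDL.induct with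
  | case1 => intro h tl he; rw [pvSplitDL_nil] at he; cases he; exact List.prefix_refl _
  | case2 t ih => intro h tl he; rw [pvSplitDL_sep] at he; cases he; simp
  | case3 c t hns hnil ih => exact absurd hnil (pvSplitDL_ne_nil t)
  | case4 c t hns h0 tl0 hdl ih =>
    intro h tl he
    rw [pvSplitDL_cons c t (by rintro ⟨rfl, v, rfl⟩; exact hns v rfl rfl), hdl] at he
    have he' : (c :: h0) :: tl0 = h :: tl := he
    cases he'
    exact List.cons_prefix_cons.mpr ⟨rfl, ih h0 tl0 hdl⟩

theorem pvSplitDL_sepFree : ∀ (cs : List Char) (p : List Char), p ∈ pvSplitDL cs →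
    ¬ (['$', '{'] <:+: p) := by
  intro cs
  induction cs using pvSplitDL.induct with
  | case1 =>
    intro p hp
    rw [pvSplitDL_nil] at hp
    simp at hp
    subst hp
    simp
  | case2 t ih =>
    intro p hp
    rw [pvSplitDL_sep] at hp
    rcases List.mem_cons.mp hp with rfl | hp
    · simp
    · exact ih p hp
  | case3 c t hns hnil ih => exact absurd hnil (pvSplitDL_ne_nil t)
  | case4 c t hns h0 tl0 hdl ih =>
    intro p hp
    rw [pvSplitDL_cons c t (by rintro ⟨rfl, v, rfl⟩; exact hns v rfl rfl), hdl] at hp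
    have hp' : p ∈ (c :: h0) :: tl0 := hp
    rcases List.mem_cons.mp hp' with rfl | hp2
    · intro hinf
      rcases List.infix_cons_iff.mp hinf with hpre | hinf
      · rcases List.cons_prefix_cons.mp hpre with ⟨rfl, hpre2⟩
        obtain ⟨w, hw⟩ := hpre2
        have hh : h0 = '{' :: w := by simpa using hw.symm
        have := pvSplitDL_head_prefix t h0 tl0 hdl
        rw [hh] at this
        obtain ⟨w2, hw2⟩ := this
        exact hns (w ++ w2) rfl (by simpa using hw2.symm)
      · exact ih h0 (by rw [hdl]; exact List.mem_cons_self) hinf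
    · exact ih p (by rw [hdl]; exact List.mem_cons_of_mem _ hp2)

theorem pvSplitDL_join : ∀ (cs : List Char),
    (match pvSplitDL cs with
     | [] => []
     | lead :: ps => lead ++ pvGlue ps) = cs := by
  intro cs
  induction cs using pvSplitDL.induct with
  | case1 => rfl
  | case2 t ih =>
    rw [pvSplitDL_sep]
    cases hdl : pvSplitDL t with
    | nil => exact absurd hdl (pvSplitDL_ne_nil t)
    | cons h0 tl0 =>
      have ih' : h0 ++ pvGlue tl0 = t := by rw [hdl] at ih; exact ih
      show ([] : List Char) ++ ('$' :: '{' :: (h0 ++ pvGlue tl0)) = '$' :: '{' :: t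
      rw [ih']
      rfl
  | case3 c t hns hnil ih => exact absurd hnil (pvSplitDL_ne_nil t)
  | case4 c t hns h0 tl0 hdl ih =>
    rw [pvSplitDL_cons c t (by rintro ⟨rfl, v, rfl⟩; exact hns v rfl rfl), hdl]
    have ih' : h0 ++ pvGlue tl0 = t := by rw [hdl] at ih; exact ih
    show (c :: h0) ++ pvGlue tl0 = c :: t
    rw [← ih']
    rfl

theorem pvScanPiece_zero : ∀ (t : List Char), pvScanPiece t 0 = ([], t, 0) := by
  intro t
  cases t <;> rfl

theorem pvScanPiece_split : ∀ (piece : List Char) (d : Nat),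
    piece = (pvScanPiece piece d).1 ++ (pvScanPiece piece d).2.1 := by
  intro piece
  induction piece with
  | nil => intro d; rfl
  | cons c t ih =>
    intro d
    by_cases hd : d = 0
    · subst hd; rw [pvScanPiece_zero]; rfl
    · simp only [pvScanPiece, if_neg hd]
      exact congrArg (fun l => c :: l) (ih _)


-- pvScanPiece against the reference pvScanBlock: either the block closes inside the piece,
-- or the whole piece is consumed and the scan continues at the final depth
theorem pvScanPiece_scanBlock : ∀ (piece : List Char) (d : Nat), 1 ≤ d →
    ((pvScanPiece piece d).2.2 = 0 →
        pvScanBlock piece d = some ((pvScanPiece piece d).1, (pvScanPiece piece d).2.1)) ∧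
    ((pvScanPiece piece d).2.2 ≠ 0 →
        (pvScanPiece piece d).1 = piece ∧ (pvScanPiece piece d).2.1 = [] ∧
        1 ≤ (pvScanPiece piece d).2.2 ∧
        ∀ ys, pvScanBlock (piece ++ ys) d =
          (pvScanBlock ys (pvScanPiece piece d).2.2).map (fun q => (piece ++ q.1, q.2))) := by
  intro piece
  induction piece with
  | nil =>
    intro d hd
    refine ⟨fun h => absurd h (by simpa using (by omega : d ≠ 0)), fun _ => ⟨rfl, rfl, hd, ?_⟩⟩
    intro ys
    simp only [List.nil_append, pvScanPiece]
    cases pvScanBlock ys d <;> simp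
  | cons c t ih =>
    intro d hd
    have hdne : ¬ (d = 0) := by omega
    simp only [pvScanPiece, if_neg hdne]
    set d' := if c = '{' then d + 1 else if c = '}' then d - 1 else d with hd'
    by_cases hz : d' = 0
    · -- the block closed on this char: c = '}' and d = 1
      have hcb : c = '}' ∧ d = 1 := by
        rw [hd'] at hz
        by_cases h1 : c = '{'
        · rw [if_pos h1] at hz; omega
        · by_cases h2 : c = '}'
          · rw [if_neg h1, if_pos h2] at hz
            exact ⟨h2, by omega⟩
          · rw [if_neg h1, if_neg h2] at hz; omega
      obtain ⟨rfl, rfl⟩ := hcb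
      rw [hz, pvScanPiece_zero]
      refine ⟨fun _ => ?_, fun h => absurd rfl h⟩
      simp [pvScanBlock]
    · have hd1 : 1 ≤ d' := by omega
      obtain ⟨ihA, ihB⟩ := ih d' hd1
      constructor
      · intro h0
        have := ihA h0
        -- pvScanBlock (c :: t) d steps to depth d' and is not the closing '}' at depth 1
        simp only [pvScanBlock]
        by_cases h1 : c = '{'
        · simp only [if_pos h1]
          rw [show d + 1 = d' by rw [hd', if_pos h1], this]
          rfl
        · by_cases h2 : c = '}'
          · have hdne1 : d ≠ 1 := by
              intro hcon
              rw [hd', if_neg h1, if_pos h2, hcon] at hz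
              exact hz rfl
            simp only [if_neg h1, if_pos h2, if_neg hdne1]
            rw [show d - 1 = d' by rw [hd', if_neg h1, if_pos h2], this]
            rfl
          · simp only [if_neg h1, if_neg h2]
            rw [show d = d' by rw [hd', if_neg h1, if_neg h2], this]
            rfl
      · intro h0
        obtain ⟨e1, e2, e3, e4⟩ := ihB h0
        refine ⟨by simp [e1], e2, e3, ?_⟩
        intro ys
        have key := e4 ys
        rw [List.cons_append]
        simp only [pvScanBlock]
        by_cases h1 : c = '{'
        · simp only [if_pos h1]
          rw [show d + 1 = d' by rw [hd', if_pos h1], key]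
          cases pvScanBlock ys (pvScanPiece t d').2.2 <;> simp
        · by_cases h2 : c = '}'
          · have hdne1 : d ≠ 1 := by
              intro hcon
              rw [hd', if_neg h1, if_pos h2, hcon] at hz
              exact hz rfl
            simp only [if_neg h1, if_pos h2, if_neg hdne1]
            rw [show d - 1 = d' by rw [hd', if_neg h1, if_pos h2], key]
            cases pvScanBlock ys (pvScanPiece t d').2.2 <;> simp
          · simp only [if_neg h1, if_neg h2]
            rw [show d = d' by rw [hd', if_neg h1, if_neg h2], key]
            cases pvScanBlock ys (pvScanPiece t d').2.2 <;> simp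

theorem pvScanBlock_append : ∀ (u : List Char) (d : Nat) (b r : List Char),
    pvScanBlock u d = some (b, r) → ∀ ys, pvScanBlock (u ++ ys) d = some (b, r ++ ys) := by
  intro u
  induction u with
  | nil => intro d b r h; simp [pvScanBlock] at h
  | cons c t ih =>
    intro d b r h ys
    simp only [pvScanBlock] at h
    rw [List.cons_append, pvScanBlock.eq_def]
    split_ifs at h with h1 h2 h3
    · rcases Option.map_eq_some_iff.mp h with ⟨⟨b', r'⟩, hp, he⟩
      cases he
      simp only [if_pos h1]
      rw [ih _ _ _ hp ys]
      rfl
    · cases h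
      simp [h2, h3]
    · rcases Option.map_eq_some_iff.mp h with ⟨⟨b', r'⟩, hp, he⟩
      cases he
      simp only [if_neg h1, if_pos h2, if_neg h3]
      rw [ih _ _ _ hp ys]
      rfl
    · rcases Option.map_eq_some_iff.mp h with ⟨⟨b', r'⟩, hp, he⟩
      cases he
      simp only [if_neg h1, if_neg h2]
      rw [ih _ _ _ hp ys]
      rfl

theorem pvMergeBlock_cons (piece : List Char) (ps : List (List Char)) (d : Nat) :
    pvMergeBlock (piece :: ps) d =
      (if (pvScanPiece piece d).2.2 = 0 then
        some ((pvScanPiece piece d).1, (pvScanPiece piece d).2.1, ps)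
       else (pvMergeBlock ps ((pvScanPiece piece d).2.2 + 1)).map
         (fun q => ((pvScanPiece piece d).1 ++ '$' :: '{' :: q.1, q.2.1, q.2.2))) := rfl

-- the merge loop over pieces computes exactly the reference block scan on the glued string
theorem pvMerge_spec : ∀ (ps : List (List Char)) (p : List Char) (d : Nat), 1 ≤ d →
    ∀ body rest, pvScanBlock (p ++ pvGlue ps) d = some (body, rest) →
    ∃ r0 ps', pvMergeBlock (p :: ps) d = some (body, r0, ps') ∧ rest = r0 ++ pvGlue ps' ∧
      (r0 <:+ p ∨ ∃ q ∈ ps, r0 <:+ q) ∧ ps' <:+ ps := by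
  intro ps
  induction ps with
  | nil =>
    intro p d hd body rest h
    obtain ⟨hA, hB⟩ := pvScanPiece_scanBlock p d hd
    by_cases hz : (pvScanPiece p d).2.2 = 0
    · have hsome := hA hz
      rw [show p ++ pvGlue [] = p ++ [] from rfl, List.append_nil] at h
      rw [hsome] at h
      obtain ⟨rfl, rfl⟩ : body = (pvScanPiece p d).1 ∧ rest = (pvScanPiece p d).2.1 := by
        injection h with h'; injection h' with e1 e2; exact ⟨e1.symm, e2.symm⟩
      refine ⟨(pvScanPiece p d).2.1, [], ?_, by simp [pvGlue], Or.inl ?_, List.suffix_refl _⟩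
      · rw [pvMergeBlock_cons, if_pos hz]
      · exact ⟨(pvScanPiece p d).1, (pvScanPiece_split p d).symm⟩
    · obtain ⟨e1, e2, e3, e4⟩ := hB hz
      rw [show pvGlue [] = ([] : List Char) from rfl] at h
      rw [e4 []] at h
      simp [pvScanBlock] at h
  | cons q qs ih =>
    intro p d hd body rest h
    obtain ⟨hA, hB⟩ := pvScanPiece_scanBlock p d hd
    by_cases hz : (pvScanPiece p d).2.2 = 0
    · have hsome := hA hz
      have := pvScanBlock_append p d _ _ hsome (pvGlue (q :: qs))
      rw [this] at h
      obtain ⟨rfl, rfl⟩ : body = (pvScanPiece p d).1 ∧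
          rest = (pvScanPiece p d).2.1 ++ pvGlue (q :: qs) := by
        injection h with h'; injection h' with e1 e2; exact ⟨e1.symm, e2.symm⟩
      refine ⟨(pvScanPiece p d).2.1, q :: qs, ?_, rfl, Or.inl ?_, List.suffix_refl _⟩
      · rw [pvMergeBlock_cons, if_pos hz]
      · exact ⟨(pvScanPiece p d).1, (pvScanPiece_split p d).symm⟩
    · obtain ⟨e1, e2, e3, e4⟩ := hB hz
      rw [show pvGlue (q :: qs) = '$' :: '{' :: (q ++ pvGlue qs) from rfl] at h
      rw [e4 ('$' :: '{' :: (q ++ pvGlue qs))] at h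
      rcases Option.map_eq_some_iff.mp h with ⟨⟨b1, r1⟩, hp1, he1⟩
      obtain ⟨rfl, rfl⟩ : body = p ++ b1 ∧ rest = r1 := by
        injection he1 with f1 f2; exact ⟨f1.symm, f2.symm⟩
      -- unfold the two separator characters in the reference scan
      have hdol : pvScanBlock ('$' :: '{' :: (q ++ pvGlue qs)) (pvScanPiece p d).2.2 =
          (pvScanBlock (q ++ pvGlue qs) ((pvScanPiece p d).2.2 + 1)).map
            (fun q2 => ('$' :: '{' :: q2.1, q2.2)) := by
        simp only [pvScanBlock, if_neg (show ¬ ('$' = '{') by decide),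
          if_neg (show ¬ ('$' = '}') by decide)]
        cases pvScanBlock (q ++ pvGlue qs) ((pvScanPiece p d).2.2 + 1) <;> simp
      rw [hdol] at hp1
      rcases Option.map_eq_some_iff.mp hp1 with ⟨⟨b2, r2⟩, hp2, he2⟩
      have f1 : b1 = '$' :: '{' :: b2 := (congrArg Prod.fst he2).symm
      have f2 : rest = r2 := (congrArg Prod.snd he2).symm
      obtain ⟨r0, ps', hm, hr, hsf, hsuf⟩ := ih q ((pvScanPiece p d).2.2 + 1) (by omega) b2 r2 hp2
      refine ⟨r0, ps', ?_, f2 ▸ hr, ?_, hsuf.trans (List.suffix_cons q qs)⟩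
      · rw [pvMergeBlock_cons, if_neg hz, hm]
        simp [e1, f1]
      · rcases hsf with hsf | ⟨q2, hq2, hsf⟩
        · exact Or.inr ⟨q, List.mem_cons_self, hsf⟩
        · exact Or.inr ⟨q2, List.mem_cons_of_mem _ hq2, hsf⟩

-- stepping over a brace-free plain prefix preserves well-formedness at depth 0
theorem pvWf_plain_prefix : ∀ (xs ys : List Char), '{' ∉ xs → (∀ v, ys ≠ '{' :: v) →
    pvWf (xs ++ ys) 0 = pvWf ys 0 := by
  intro xs
  induction xs with
  | nil => intro ys _ _; rfl
  | cons c t ih =>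
    intro ys hnb hys
    have hc : c ≠ '{' := fun h => hnb (h ▸ List.mem_cons_self)
    have hnbt : '{' ∉ t := fun h => hnb (List.mem_cons_of_mem _ h)
    have hnbs : ¬ (c = '$' ∧ ∃ v, t ++ ys = '{' :: v) := by
      rintro ⟨rfl, v, hv⟩
      cases t with
      | nil => exact hys v (by simpa using hv)
      | cons x u =>
        have : x = '{' := by simpa using congrArg (fun l => l.head?) hv
        exact hnbt (this ▸ List.mem_cons_self)
    rw [List.cons_append, pvWf_plain c (t ++ ys) hc hnbs]
    exact ih ys hnbt hys

-- a sep-free region that is well-formed at depth 0 contains no '{' before its tail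
theorem pvWf_no_brace : ∀ (xs ys : List Char), ¬ (['$', '{'] <:+: xs) →
    pvWf (xs ++ ys) 0 = true → '{' ∉ xs := by
  intro xs
  induction xs with
  | nil => intro ys _ _; simp
  | cons c t ih =>
    intro ys hsf hw
    by_cases hc : c = '{'
    · subst hc
      rw [List.cons_append, pvWf_open] at hw
      cases hw
    · have hsft : ¬ (['$', '{'] <:+: t) := fun h => hsf (h.trans (List.suffix_cons c t).isInfix)
      by_cases hbs : c = '$' ∧ ∃ v, t ++ ys = '{' :: v
      · obtain ⟨rfl, v, hv⟩ := hbs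
        cases t with
        | nil => simp
        | cons x u =>
          have hx : x = '{' := by simpa using congrArg (fun l => l.head?) hv
          subst hx
          exact absurd (List.infix_cons_iff.mpr (Or.inl ⟨u, rfl⟩)) hsf
      · rw [List.cons_append, pvWf_plain c (t ++ ys) hc hbs] at hw
        intro hm
        rcases List.mem_cons.mp hm with h | h
        · exact hc h.symm
        · exact ih ys hsft hw h

theorem pvSepFree_suffix {r0 p : List Char} (h : r0 <:+ p) (hsf : ¬ (['$', '{'] <:+: p)) :
    ¬ (['$', '{'] <:+: r0) := fun hinf => hsf (hinf.trans h.isInfix)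

theorem pvLoopB_cons (fuel : Nat) (piece : List Char) (ps : List (List Char)) :
    pvLoopB (fuel + 1) (piece :: ps) =
      (match pvMergeBlock (piece :: ps) 1 with
       | none => none
       | some (body, rest0, ps') =>
         let body2 := if PySem.Chars.startswith rest0 ['?'] then body ++ ['?'] else body
         let rest := if PySem.Chars.startswith rest0 ['?'] then rest0.drop 1 else rest0
         if '{' ∈ rest then none
         else
           match pvLoopB fuel ps' with
           | none => none
           | some ts => some (('$' :: '{' :: body2) :: (if rest ≠ [] then [rest] else []) ++ ts)) := rfl

-- plain-run consumption on a brace-free prefix followed by nothing or a block start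
theorem pvTakePlain_append : ∀ (xs ys : List Char), '{' ∉ xs →
    (ys = [] ∨ ∃ v, ys = '$' :: '{' :: v) → pvTakePlain (xs ++ ys) = (xs, ys) := by
  intro xs
  induction xs with
  | nil =>
    intro ys _ hys
    rcases hys with rfl | ⟨v, rfl⟩
    · rfl
    · simp only [List.nil_append]
      rw [pvTakePlain]
      rw [if_pos (Or.inr (show pvIsBlockStart ('$' :: '{' :: v) = true from rfl))]
  | cons c t ih =>
    intro ys hnb hys
    have hc : c ≠ '{' := fun h => hnb (h ▸ List.mem_cons_self)
    have hnbt : '{' ∉ t := fun h => hnb (List.mem_cons_of_mem _ h)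
    have hbs : pvIsBlockStart (c :: (t ++ ys)) = false := by
      rw [Bool.eq_false_iff]
      intro h
      rw [pvIsBlockStart_iff] at h
      obtain ⟨rfl, v, hv⟩ := h
      cases t with
      | nil =>
        rcases hys with rfl | ⟨w, rfl⟩
        · cases hv
        · injection hv with h1 _; exact absurd h1.symm (by decide)
      | cons x u =>
        have hx : x = '{' := by simpa using congrArg (fun l => l.head?) hv
        exact hnbt (hx ▸ List.mem_cons_self)
    rw [List.cons_append, pvTakePlain]
    rw [if_neg (by simp [hc, hbs])]
    rw [ih ys hnbt hys]

-- one round of B's outer loop = one (block token [+ plain token]) of the reference tokenizer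
theorem pvLoopB_eq : ∀ (fuel : Nat) (ps : List (List Char)), ps.length ≤ fuel →
    (∀ p ∈ ps, ¬ (['$', '{'] <:+: p)) → pvWf (pvGlue ps) 0 = true →
    pvLoopB fuel ps = some (pvSplitB (pvGlue ps)) := by
  intro fuel
  induction fuel with
  | zero =>
    intro ps hle _ _
    have : ps = [] := List.length_eq_zero_iff.mp (by omega)
    subst this
    simp [pvLoopB, pvGlue, pvSplitB]
  | succ fuel ih =>
    intro ps hle hsf hw
    cases ps with
    | nil => simp [pvLoopB, pvGlue, pvSplitB]
    | cons p ps1 =>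
      rw [show pvGlue (p :: ps1) = '$' :: '{' :: (p ++ pvGlue ps1) from rfl] at hw ⊢
      rw [pvWf_bs] at hw
      obtain ⟨body, rest, hscan, hwrest⟩ := pvWf_block (p ++ pvGlue ps1) 1 le_rfl hw
      obtain ⟨r0, ps', hm, hr, hr0sf, hsuf⟩ := pvMerge_spec ps1 p 1 le_rfl body rest hscan
      have hr0free : ¬ (['$', '{'] <:+: r0) := by
        rcases hr0sf with h | ⟨q, hq, h⟩
        · exact pvSepFree_suffix h (hsf p List.mem_cons_self)
        · exact pvSepFree_suffix h (hsf q (List.mem_cons_of_mem _ hq))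
      have hps'sf : ∀ q ∈ ps', ¬ (['$', '{'] <:+: q) := fun q hq =>
        hsf q (List.mem_cons_of_mem _ (hsuf.subset hq))
      have hps'le : ps'.length ≤ fuel := by
        have := hsuf.length_le
        simp at hle
        omega
      have hglue_ne : ∀ v, pvGlue ps' ≠ '{' :: v := by
        intro v h
        cases ps' with
        | nil => cases h
        | cons a b => cases h
      -- peel the optional '?' exactly as the reference does
      rcases hq? : r0 with - | ⟨c0, r0t⟩
      · -- r0 = []: rest = pvGlue ps', no '?', no plain token
        subst hq?
        rw [List.nil_append] at hr
        subst hr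
        have hnq : ∀ r2, pvGlue ps' ≠ '?' :: r2 := by
          intro r2 h
          cases ps' with
          | nil => cases h
          | cons a b => cases h
        rw [pvSplitB_blockN _ body _ hscan hnq, pvLoopB_cons, hm]
        dsimp only
        simp only [show PySem.Chars.startswith ([] : List Char) ['?'] = false from rfl,
          Bool.false_eq_true, if_false]
        rw [if_neg (show ¬ ('{' ∈ ([] : List Char)) by simp)]
        rw [ih ps' hps'le hps'sf hwrest]
        simp
      · by_cases hc0 : c0 = '?'
        · -- r0 = '?' :: r0t : the token swallows the '?', then a plain run r0t
          subst hc0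
          rw [hq?] at hr
          rw [hr] at hscan hwrest
          rw [pvSplitB_blockQ _ body _ hscan]
          have hr0tfree : ¬ (['$', '{'] <:+: r0t) := by
            intro h
            exact hr0free (by rw [hq?]; exact h.trans (List.suffix_cons '?' r0t).isInfix)
          have hwrest' : pvWf (r0t ++ pvGlue ps') 0 = true := by
            rw [List.cons_append] at hwrest
            rw [pvWf_plain '?' _ (by decide) ?hh] at hwrest
            · exact hwrest
            case hh =>
              rintro ⟨h, -⟩
              exact absurd h (by decide)
          have hnb : '{' ∉ r0t := pvWf_no_brace r0t (pvGlue ps') hr0tfree hwrest'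
          have hwg : pvWf (pvGlue ps') 0 = true := by
            rw [pvWf_plain_prefix r0t (pvGlue ps') hnb hglue_ne] at hwrest'
            exact hwrest'
          rw [pvLoopB_cons, hm, hq?]
          dsimp only
          have hsw : PySem.Chars.startswith ('?' :: r0t) ['?'] = true := by
            rw [PySem.Chars.startswith_iff]
            exact ⟨r0t, rfl⟩
          simp only [hsw, if_pos, List.drop_succ_cons, List.drop_zero]
          rw [if_neg (by simpa using hnb)]
          rw [ih ps' hps'le hps'sf hwg]
          -- now compare the emitted tokens with pvSplitB ('?'-swallowed rest)
          cases hr0t : r0t with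
          | nil =>
            simp
          | cons c1 t1 =>
            rw [← hr0t]
            have hsplit : pvSplitB (r0t ++ pvGlue ps') = r0t :: pvSplitB (pvGlue ps') := by
              rw [hr0t, List.cons_append]
              have hc1 : c1 ≠ '{' := fun h => hnb (by rw [hr0t, h]; exact List.mem_cons_self)
              have hnbs2 : ¬ (c1 = '$' ∧ ∃ v, t1 ++ pvGlue ps' = '{' :: v) := by
                rintro ⟨rfl, v, hv⟩
                cases t1 with
                | nil => exact hglue_ne v (by simpa using hv)
                | cons x u =>
                  have hx : x = '{' := by simpa using congrArg (fun l => l.head?) hv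
                  exact hnb (by rw [hr0t, hx]; exact List.mem_cons_of_mem _ List.mem_cons_self)
              rw [pvSplitB_plain c1 _ hc1 hnbs2]
              have htp : pvTakePlain (t1 ++ pvGlue ps') = (t1, pvGlue ps') := by
                apply pvTakePlain_append
                · intro h; exact hnb (by rw [hr0t]; exact List.mem_cons_of_mem _ h)
                · cases ps' with
                  | nil => exact Or.inl rfl
                  | cons a b => exact Or.inr ⟨a ++ pvGlue b, rfl⟩
              rw [htp]
            simp only [List.append_eq]
            rw [hsplit]
            rw [if_pos (show r0t ≠ [] by rw [hr0t]; simp)]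
            simp
        · -- r0 does not start with '?': plain token r0 (if nonempty)
          rw [hq?] at hr
          rw [hr] at hscan hwrest
          have hnq : ∀ r2, (c0 :: r0t) ++ pvGlue ps' ≠ '?' :: r2 := by
            intro r2 h
            exact hc0 (by simpa using congrArg (fun l => l.head?) h)
          rw [pvSplitB_blockN _ body _ hscan hnq]
          have hr0free' : ¬ (['$', '{'] <:+: c0 :: r0t) := by rw [← hq?]; exact hr0free
          have hnb : '{' ∉ c0 :: r0t := pvWf_no_brace _ (pvGlue ps') hr0free' hwrest
          have hwg : pvWf (pvGlue ps') 0 = true := by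
            rw [pvWf_plain_prefix _ (pvGlue ps') hnb hglue_ne] at hwrest
            exact hwrest
          rw [pvLoopB_cons, hm, hq?]
          dsimp only
          have hsw : PySem.Chars.startswith (c0 :: r0t) ['?'] = false := by
            rw [Bool.eq_false_iff]
            intro h
            rw [PySem.Chars.startswith_iff] at h
            exact hc0 (List.cons_prefix_cons.mp h).1.symm
          simp only [hsw, Bool.false_eq_true, if_false]
          rw [if_neg (by simpa using hnb)]
          rw [ih ps' hps'le hps'sf hwg]
          have hsplit : pvSplitB ((c0 :: r0t) ++ pvGlue ps') =
              (c0 :: r0t) :: pvSplitB (pvGlue ps') := by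
            rw [List.cons_append]
            have hc1 : c0 ≠ '{' := fun h => hnb (h ▸ List.mem_cons_self)
            have hnbs2 : ¬ (c0 = '$' ∧ ∃ v, r0t ++ pvGlue ps' = '{' :: v) := by
              rintro ⟨rfl, v, hv⟩
              cases r0t with
              | nil => exact hglue_ne v (by simpa using hv)
              | cons x u =>
                have hx : x = '{' := by simpa using congrArg (fun l => l.head?) hv
                exact hnb (hx ▸ List.mem_cons_of_mem _ List.mem_cons_self)
            rw [pvSplitB_plain c0 _ hc1 hnbs2]
            have htp : pvTakePlain (r0t ++ pvGlue ps') = (r0t, pvGlue ps') := by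
              apply pvTakePlain_append
              · intro h; exact hnb (List.mem_cons_of_mem _ h)
              · cases ps' with
                | nil => exact Or.inl rfl
                | cons a b => exact Or.inr ⟨a ++ pvGlue b, rfl⟩
            rw [htp]
          rw [hsplit]
          rw [if_pos (by simp)]
          rfl

-- B's whole pipeline computes the reference tokenizer on every well-formed input
theorem pvAlt_eq_splitB (s : String) (hw : pvWf s.toList 0 = true) :
    split_into_sub_patterns_alt s = (pvSplitB s.toList).map String.ofList := by
  unfold split_into_sub_patterns_alt
  cases hdl : pvSplitDL s.toList with
  | nil => exact absurd hdl (pvSplitDL_ne_nil _)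
  | cons lead ps =>
    have hjoin : lead ++ pvGlue ps = s.toList := by
      have := pvSplitDL_join s.toList
      rw [hdl] at this
      exact this
    have hleadsf : ¬ (['$', '{'] <:+: lead) :=
      pvSplitDL_sepFree s.toList lead (by rw [hdl]; exact List.mem_cons_self)
    have hpssf : ∀ p ∈ ps, ¬ (['$', '{'] <:+: p) := fun p hp =>
      pvSplitDL_sepFree s.toList p (by rw [hdl]; exact List.mem_cons_of_mem _ hp)
    have hw' : pvWf (lead ++ pvGlue ps) 0 = true := by rw [hjoin]; exact hw
    have hnb : '{' ∉ lead := pvWf_no_brace lead (pvGlue ps) hleadsf hw'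
    have hglue_ne : ∀ v, pvGlue ps ≠ '{' :: v := by
      intro v h
      cases ps with
      | nil => cases h
      | cons a b => cases h
    have hwg : pvWf (pvGlue ps) 0 = true := by
      rw [pvWf_plain_prefix lead (pvGlue ps) hnb hglue_ne] at hw'
      exact hw'
    dsimp only
    rw [if_neg (by simpa using hnb)]
    rw [pvLoopB_eq ps.length ps le_rfl hpssf hwg]
    have hsplit : pvSplitB s.toList =
        (if lead ≠ [] then [lead] else []) ++ pvSplitB (pvGlue ps) := by
      rw [← hjoin]
      cases hld : lead with
      | nil => simp
      | cons c t =>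
        rw [hld] at hnb
        have hc : c ≠ '{' := fun h => hnb (h ▸ List.mem_cons_self)
        have hnbt : '{' ∉ t := fun h => hnb (List.mem_cons_of_mem _ h)
        have hnbs2 : ¬ (c = '$' ∧ ∃ v, t ++ pvGlue ps = '{' :: v) := by
          rintro ⟨rfl, v, hv⟩
          cases t with
          | nil => exact hglue_ne v (by simpa using hv)
          | cons x u =>
            have hx : x = '{' := by simpa using congrArg (fun l => l.head?) hv
            exact hnbt (hx ▸ List.mem_cons_self)
        rw [List.cons_append, pvSplitB_plain c _ hc hnbs2]
        have htp : pvTakePlain (t ++ pvGlue ps) = (t, pvGlue ps) := by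
          apply pvTakePlain_append
          · exact hnbt
          · cases ps with
            | nil => exact Or.inl rfl
            | cons a b => exact Or.inr ⟨a ++ pvGlue b, rfl⟩
        rw [htp]
        simp
    rw [hsplit]

-- ===== VERDICT (by name: the statement is the Claim_ definition above) =====
theorem split_into_sub_patterns_spec : Claim_equal_split_into_sub_patterns := by
  intro s _hdom hpre
  unfold Spec_split_into_sub_patterns split_into_sub_patterns
  have h := pvLoopA_eq_splitB (s.toList.length + 1) s.toList 0 [] (by omega) (by omega) (by simpa using hpre)
  simp only [Nat.cast_zero, List.drop_zero, List.nil_append] at h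
  rw [h, pvAlt_eq_splitB s (by simpa using hpre)]
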